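-- pv_equiv track=rewrite | github.com/dividor/evidencelab | tests/evaluation/toc_classification/test_toc_hierarchy.py | get_toc_page_range
-- ===== SOURCE A (Python) =====
-- from typing import Any, Dict, Iterable, List, Optional, Tuple
--
-- def get_toc_page_range(
--     toc_entries: Iterable[Dict[str, Any]],
--     total_pages: Optional[int] = None,
-- ) -> Tuple[Optional[int], Optional[int]]:
--     pages = [entry["page"] for entry in toc_entries if entry.get("page", -1) > 0]
--     if not pages:
--         return None, None
--     start_page = min(pages)
--     end_page = max(pages)
--     if total_pages is not None and end_page > total_pages:
--         end_page = total_pages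
--     return start_page, end_page
-- ===== SOURCE B (Python) =====
-- from typing import Any, Dict, Iterable, Optional, Tuple
--
--
-- def get_toc_page_range(
--     toc_entries,
--     total_pages=None,
-- ):
--     ordered = sorted(e["page"] for e in toc_entries if e.get("page", -1) > 0)
--     if not ordered:
--         return None, None
--     end = ordered[-1]
--     if total_pages is not None and end > total_pages:
--         end = total_pages
--     return ordered[0], end
-- ===== Notes on version B (the rewrite author's own statement) =====
-- stated objective: alternative
-- what changed: Sorts the filtered page numbers once and reads the range off the first and last elements of the sorted list, instead of two separate min() and max() scans.
import Mathlib
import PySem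

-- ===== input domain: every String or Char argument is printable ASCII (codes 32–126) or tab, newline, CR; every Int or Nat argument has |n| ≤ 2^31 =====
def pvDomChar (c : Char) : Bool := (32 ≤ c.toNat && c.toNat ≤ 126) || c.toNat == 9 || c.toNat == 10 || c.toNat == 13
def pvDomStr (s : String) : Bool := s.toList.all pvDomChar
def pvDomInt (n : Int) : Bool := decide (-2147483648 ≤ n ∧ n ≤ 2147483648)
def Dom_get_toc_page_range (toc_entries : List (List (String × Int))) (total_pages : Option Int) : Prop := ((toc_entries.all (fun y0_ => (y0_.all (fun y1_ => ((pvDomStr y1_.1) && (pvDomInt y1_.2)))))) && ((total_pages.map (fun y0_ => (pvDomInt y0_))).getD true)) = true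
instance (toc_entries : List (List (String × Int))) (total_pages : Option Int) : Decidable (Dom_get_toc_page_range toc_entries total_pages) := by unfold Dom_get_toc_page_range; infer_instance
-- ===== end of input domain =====

-- B sorts the filtered page numbers once and reads the range off the ends of the
-- sorted list, instead of A's separate min() and max() scans (alternative algorithm).

-- ===== PORT A =====
-- dict[str,int] arrives as an assoc list; entry.get(k, d) = value at the FIRST pair with that key, else d
def entryGetA (e : List (String × Int)) (k : String) (d : Int) : Int :=
  match e.find? (fun q => q.1 == k) with
  | some q => q.2
  | none => d
-- pages = [entry["page"] for entry in toc_entries if entry.get("page", -1) > 0]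
-- (after the guard the key is present, so entry["page"] equals entry.get("page", -1))
def get_toc_page_range (toc_entries : List (List (String × Int))) (total_pages : Option Int) : Option Int × Option Int :=
  let pages := toc_entries.foldl
    (fun acc e => if entryGetA e "page" (-1) > 0 then acc ++ [entryGetA e "page" (-1)] else acc) []
  if pages = [] then (none, none)
  else
    match PySem.List.min? pages (fun x => x), PySem.List.max? pages (fun x => x) with
    | some start_page, some end_page =>
        let end_page := match total_pages with
          | some t => if end_page > t then t else end_page
          | none => end_page
        (some start_page, some end_page)
    | _, _ => (none, none)

-- ===== PORT B =====
-- same assoc-list .get, B's own copy (Option combinators, no matcher shared with A's port)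
def entryGetB (e : List (String × Int)) (k : String) (d : Int) : Int :=
  ((e.find? (fun q => q.1 == k)).map Prod.snd).getD d

-- ordered = sorted(e["page"] for e in toc_entries if e.get("page", -1) > 0)
def get_toc_page_range_alt (toc_entries : List (List (String × Int))) (total_pages : Option Int) : Option Int × Option Int :=
  let ordered := PySem.List.sorted
    (toc_entries.filterMap (fun e => if entryGetB e "page" (-1) > 0 then some (entryGetB e "page" (-1)) else none))
    (fun x => x) false
  match ordered with
  | [] => (none, none)
  | h :: t =>
      let last := (h :: t).getLast (List.cons_ne_nil h t)
      (some h, some (total_pages.elim last (fun tp => if last > tp then tp else last)))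

-- ===== PRECONDITION & SPEC =====
def Spec_get_toc_page_range (toc_entries : List (List (String × Int))) (total_pages : Option Int) (out : Option Int × Option Int) : Prop := out = get_toc_page_range_alt toc_entries total_pages
instance (toc_entries : List (List (String × Int))) (total_pages : Option Int) (out : Option Int × Option Int) : Decidable (Spec_get_toc_page_range toc_entries total_pages out) := by unfold Spec_get_toc_page_range; infer_instance

-- ===== CLAIM (what is proved, stated in full; the proofs are below) =====
def Claim_equal_get_toc_page_range : Prop := ∀ (toc_entries : List (List (String × Int))) (total_pages : Option Int), Dom_get_toc_page_range toc_entries total_pages → Spec_get_toc_page_range toc_entries total_pages (get_toc_page_range toc_entries total_pages)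

-- ===== LEMMAS AND PROOFS =====

def pvPages (toc : List (List (String × Int))) : List Int :=
  toc.filterMap (fun e => if entryGetB e "page" (-1) > 0 then some (entryGetB e "page" (-1)) else none)

theorem entryGet_eq : entryGetA = entryGetB := by
  funext e k d
  unfold entryGetA entryGetB
  cases e.find? (fun q => q.1 == k) <;> rfl

theorem pagesFold_eq (toc : List (List (String × Int))) (acc : List Int) :
    toc.foldl (fun acc e => if entryGetB e "page" (-1) > 0 then acc ++ [entryGetB e "page" (-1)] else acc) acc
      = acc ++ pvPages toc := by
  induction toc generalizing acc with
  | nil => simp [pvPages]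
  | cons h t ih =>
      simp only [List.foldl_cons, pvPages, List.filterMap_cons]
      by_cases hp : entryGetB h "page" (-1) > 0 <;> simp [hp, ih, pvPages]

theorem foldl_min_mem (t : List Int) (p : Int) : t.foldl min p ∈ p :: t := by
  have h := PySem.List.min?_mem (xs := p :: t) (key := fun x => x) (m := t.foldl min p)
  exact h (PySem.List.min?_id_cons ..)

theorem foldl_min_isMin (t : List Int) (p : Int) : ∀ y ∈ p :: t, t.foldl min p ≤ y := by
  have h := PySem.List.min?_isMin (xs := p :: t) (key := fun x => x) (m := t.foldl min p)
    (PySem.List.min?_id_cons ..)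
  simpa using h

theorem foldl_max_mem (t : List Int) (p : Int) : t.foldl max p ∈ p :: t := by
  have h := PySem.List.max?_mem (xs := p :: t) (key := fun x => x) (m := t.foldl max p)
  exact h (PySem.List.max?_id_cons ..)

theorem foldl_max_isMax (t : List Int) (p : Int) : ∀ y ∈ p :: t, y ≤ t.foldl max p := by
  have h := PySem.List.max?_isMax (xs := p :: t) (key := fun x => x) (m := t.foldl max p)
    (PySem.List.max?_id_cons ..)
  simpa using h

-- the head of sorted(p::t) is Python's min(p::t)
theorem head_sorted_eq_min (p : Int) (t : List Int) (h : Int) (t' : List Int)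
    (hs : PySem.List.sorted (p :: t) (fun x => x) false = h :: t') :
    h = t.foldl min p := by
  have hmem : h ∈ p :: t := by
    have : h ∈ PySem.List.sorted (p :: t) (fun x => x) false := by simp [hs]
    simpa [PySem.List.mem_sorted] using this
  have hle : ∀ y ∈ p :: t, h ≤ y := by
    have := PySem.List.key_head_sorted_le (xs := p :: t) (key := fun x => x) hs
    simpa using this
  exact le_antisymm (hle _ (foldl_min_mem t p)) (foldl_min_isMin t p h hmem)

-- the last element of sorted(p::t) is Python's max(p::t)
theorem last_sorted_eq_max (p : Int) (t : List Int) (m : Int)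
    (hs : (PySem.List.sorted (p :: t) (fun x => x) false).getLast? = some m) :
    m = t.foldl max p := by
  set s := PySem.List.sorted (p :: t) (fun x => x) false with hsdef
  have hmem : m ∈ s := List.mem_of_getLast? hs
  have hpair : s.Pairwise (fun a b => a ≤ b) := by
    simpa using PySem.List.sorted_pairwise (xs := p :: t) (key := fun x => x)
  have hge : ∀ y ∈ s, y ≤ m := by
    intro y hy
    rcases List.getLast?_eq_some_iff.mp hs with ⟨s', hs'⟩
    rw [hs'] at hy hpair
    rcases List.mem_append.mp hy with h1 | h2
    · exact (List.pairwise_append.mp hpair).2.2 y h1 m (by simp)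
    · simp_all
  have hmem' : m ∈ p :: t := by simpa [hsdef, PySem.List.mem_sorted] using hmem
  have hfold_mem : t.foldl max p ∈ s := by
    simpa [hsdef, PySem.List.mem_sorted] using foldl_max_mem t p
  exact le_antisymm (foldl_max_isMax t p m hmem') (hge _ hfold_mem)

-- ===== VERDICT (by name: the statement is the Claim_ definition above) =====
theorem get_toc_page_range_spec : Claim_equal_get_toc_page_range := by
  intro toc total _
  show get_toc_page_range toc total = get_toc_page_range_alt toc total
  unfold get_toc_page_range get_toc_page_range_alt
  rw [entryGet_eq, pagesFold_eq]
  simp only [List.nil_append]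
  show (if pvPages toc = [] then _ else _) = _
  cases hp : pvPages toc with
  | nil =>
      simp only [pvPages] at hp
      have hz : PySem.List.sorted ([] : List Int) (fun x => x) false = [] :=
        by simp [PySem.List.sorted_eq_nil_iff]
      simp [hp, hz]
  | cons p t =>
      have hne : PySem.List.sorted (p :: t) (fun x => x) false ≠ [] := by
        simp [PySem.List.sorted_eq_nil_iff]
      cases hs : PySem.List.sorted (p :: t) (fun x => x) false with
      | nil => exact absurd hs hne
      | cons h t' =>
          have hm : (h :: t').getLast? = some ((h :: t').getLast (List.cons_ne_nil h t')) :=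
            List.getLast?_eq_some_getLast (by simp)
          have h1 : h = t.foldl min p := head_sorted_eq_min p t h t' hs
          have h2 : (h :: t').getLast (List.cons_ne_nil h t') = t.foldl max p :=
            last_sorted_eq_max p t _ (by rw [hs]; exact hm)
          subst h1
          simp only [pvPages] at hp
          cases total <;>
            simp [hp, hs, h2, PySem.List.min?_id_cons, PySem.List.max?_id_cons, Option.elim]
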